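-- pv_equiv track=rewrite | github.com/ivesn365/detecteurFaute | detecteurFaute.py | nombreLigneBody
-- ===== SOURCE A (Python) =====
-- def nombreLigneBody(fichier):
--     compteur = 0
--     tempo = ''
--     for ligne in fichier:
--         for caractere in list(ligne):
--             if(tempo != 'body'):
--                 if caractere == 'b':
--                     tempo = tempo + caractere
--                 elif caractere == 'o':
--                     tempo = tempo + caractere
--                 elif caractere == 'd':
--                     tempo = tempo + caractere
--                 elif caractere == 'y':
--                     tempo = tempo + caractere
--
--         if  tempo == 'body':
--             compteur = compteur + 1
--         if tempo != 'body':
--             tempo = ''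
--     return compteur - 1
-- ===== SOURCE B (Python) =====
-- def nombreLigneBody(fichier):
--     lignes = list(fichier)
--     for i, ligne in enumerate(lignes):
--         chars = [c for c in ligne if c in 'body']
--         if chars[:4] == ['b', 'o', 'd', 'y']:
--             return len(lignes) - i - 1
--     return -1
-- ===== Notes on version B (the rewrite author's own statement) =====
-- stated objective: simpler
-- what changed: Replaces the per-character cross-line state machine (tempo accumulator carried through every line, counter incremented on every later line) by a first-match search: find the first line whose filtered b/o/d/y characters start with 'body' and return len(lignes)-i-1 in closed form, -1 if none.
import Mathlib
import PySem

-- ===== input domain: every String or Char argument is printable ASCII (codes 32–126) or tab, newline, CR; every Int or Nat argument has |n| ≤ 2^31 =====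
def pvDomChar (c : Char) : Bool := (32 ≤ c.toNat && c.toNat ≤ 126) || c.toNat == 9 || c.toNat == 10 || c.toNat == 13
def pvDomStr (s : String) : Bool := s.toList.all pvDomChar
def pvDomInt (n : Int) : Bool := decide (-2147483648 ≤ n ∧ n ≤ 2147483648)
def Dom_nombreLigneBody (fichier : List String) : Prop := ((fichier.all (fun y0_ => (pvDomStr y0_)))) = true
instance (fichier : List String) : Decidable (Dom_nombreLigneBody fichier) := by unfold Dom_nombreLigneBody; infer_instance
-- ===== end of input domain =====

-- B replaces A's cross-line character state machine by a first-match line search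
-- plus the closed-form count len - i - 1 (objective: simpler).

-- ===== PORT A =====
-- tempo is kept as a List Char (Python's growing string of collected characters)
def pvStepChar (tempo : List Char) (c : Char) : List Char :=
  if tempo ≠ ['b', 'o', 'd', 'y'] then
    if c = 'b' then tempo ++ [c]
    else if c = 'o' then tempo ++ [c]
    else if c = 'd' then tempo ++ [c]
    else if c = 'y' then tempo ++ [c]
    else tempo
  else tempo

def pvStepLine (st : Int × List Char) (ligne : String) : Int × List Char :=
  let tempo := ligne.toList.foldl pvStepChar st.2
  let compteur := if tempo = ['b', 'o', 'd', 'y'] then st.1 + 1 else st.1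
  let tempo' := if tempo ≠ ['b', 'o', 'd', 'y'] then [] else tempo
  (compteur, tempo')

def nombreLigneBody (fichier : List String) : Int :=
  (fichier.foldl pvStepLine (0, [])).1 - 1

-- ===== PORT B =====
-- chars = [c for c in ligne if c in 'body']; chars[:4] == list('body')
def pvBodyLine (ligne : String) : Bool :=
  ((ligne.toList.filter (fun c => (['b', 'o', 'd', 'y'] : List Char).contains c)).take 4)
    = ['b', 'o', 'd', 'y']

-- the enumerate loop: first matching index i gives n - i - 1, else -1
def pvScan (lignes : List String) (n : Int) (i : Int) : Int :=
  match lignes with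
  | [] => -1
  | l :: rest => if pvBodyLine l then n - i - 1 else pvScan rest n (i + 1)

def nombreLigneBody_alt (fichier : List String) : Int :=
  pvScan fichier fichier.length 0

-- ===== PRECONDITION & SPEC =====
def Spec_nombreLigneBody (fichier : List String) (out : Int) : Prop := out = nombreLigneBody_alt fichier
instance (fichier : List String) (out : Int) : Decidable (Spec_nombreLigneBody fichier out) := by unfold Spec_nombreLigneBody; infer_instance

-- ===== CLAIM (what is proved, stated in full; the proofs are below) =====
def Claim_equal_nombreLigneBody : Prop := ∀ (fichier : List String), Dom_nombreLigneBody fichier → Spec_nombreLigneBody fichier (nombreLigneBody fichier)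

-- ===== LEMMAS AND PROOFS =====

-- once tempo has become 'body' it stays 'body'
theorem foldl_stepChar_body (cs : List Char) :
    cs.foldl pvStepChar ['b', 'o', 'd', 'y'] = ['b', 'o', 'd', 'y'] := by
  induction cs with
  | nil => rfl
  | cons c cs ih => simpa [pvStepChar] using ih

-- a tempo of length ≥ 5 never shrinks, hence never becomes 'body'
theorem foldl_stepChar_long (cs : List Char) (t : List Char) (h : 5 ≤ t.length) :
    5 ≤ (cs.foldl pvStepChar t).length := by
  induction cs generalizing t with
  | nil => simpa using h
  | cons c cs ih =>
    have hne : t ≠ ['b', 'o', 'd', 'y'] := by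
      intro he; rw [he] at h; simp at h
    simp only [List.foldl_cons, pvStepChar, if_pos hne]
    split_ifs <;> apply ih <;> first | (simp; omega) | exact h

-- the inner character loop yields 'body' iff the first four filtered chars are b,o,d,y
theorem foldl_stepChar_iff (cs : List Char) (t : List Char) (ht : t.length ≤ 4) :
    cs.foldl pvStepChar t = ['b', 'o', 'd', 'y'] ↔
      ((t ++ cs.filter (fun c => (['b', 'o', 'd', 'y'] : List Char).contains c)).take 4)
        = ['b', 'o', 'd', 'y'] := by
  induction cs generalizing t with
  | nil =>
    simp only [List.foldl_nil, List.filter_nil, List.append_nil, List.take_of_length_le ht]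
  | cons c cs ih =>
    by_cases hb : t = ['b', 'o', 'd', 'y']
    · subst hb
      simp [pvStepChar, foldl_stepChar_body]
    · by_cases hc : (['b', 'o', 'd', 'y'] : List Char).contains c
      · -- c is collected
        have hc' : c = 'b' ∨ c = 'o' ∨ c = 'd' ∨ c = 'y' := by simpa using hc
        have hstep : pvStepChar t c = t ++ [c] := by
          simp only [pvStepChar, if_pos hb]
          rcases hc' with h | h | h | h <;> simp [h]
        by_cases h4 : t.length = 4
        · -- tempo already full and ≠ body: both sides false
          have hL : ¬ (cs.foldl pvStepChar (t ++ [c]) = ['b', 'o', 'd', 'y']) := by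
            intro he
            have := foldl_stepChar_long cs (t ++ [c]) (by simp [h4])
            rw [he] at this; simp at this
          have hR : (t ++ c :: cs.filter (fun c => (['b', 'o', 'd', 'y'] : List Char).contains c)).take 4 = t := by
            rw [List.take_append_of_le_length (by omega)]
            exact List.take_of_length_le (by omega)
          simp only [List.foldl_cons, hstep]
          rw [List.filter_cons, if_pos hc, hR]
          exact ⟨fun h => absurd h hL, fun h => absurd h hb⟩
        · have ih' := ih (t ++ [c]) (by simp; omega)
          simp only [List.foldl_cons, hstep, List.filter_cons, hc, if_pos]
          rw [ih']
          simp
      · -- c is skipped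
        have hc' : ¬ (c = 'b' ∨ c = 'o' ∨ c = 'd' ∨ c = 'y') := by simpa using hc
        have hstep : pvStepChar t c = t := by
          simp only [pvStepChar, if_pos hb]
          split_ifs with h1 h2 h3 h4 <;> simp_all
        simp only [List.foldl_cons, hstep, List.filter_cons]
        rw [if_neg (by simpa using hc)]
        exact ih t ht

theorem inner_body_iff (l : String) :
    (l.toList.foldl pvStepChar [] = ['b', 'o', 'd', 'y']) ↔ pvBodyLine l = true := by
  rw [foldl_stepChar_iff l.toList [] (by simp)]
  simp [pvBodyLine]

-- once a line matched, every later line increments the counter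
theorem foldl_stepLine_body (lignes : List String) (c : Int) :
    (lignes.foldl pvStepLine (c, ['b', 'o', 'd', 'y'])).1 = c + lignes.length := by
  induction lignes generalizing c with
  | nil => simp
  | cons l rest ih =>
    have : pvStepLine (c, ['b', 'o', 'd', 'y']) l = (c + 1, ['b', 'o', 'd', 'y']) := by
      simp [pvStepLine, foldl_stepChar_body l.toList]
    rw [List.foldl_cons, this, ih]
    simp only [List.length_cons]
    push_cast; ring

theorem main_lemma (lignes : List String) (c n i : Int)
    (h : n = i + lignes.length) :
    (lignes.foldl pvStepLine (c, [])).1 = c + pvScan lignes n i + 1 := by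
  induction lignes generalizing c i with
  | nil => simp [pvScan]
  | cons l rest ih =>
    by_cases hl : pvBodyLine l = true
    · have hin : l.toList.foldl pvStepChar [] = ['b', 'o', 'd', 'y'] :=
        (inner_body_iff l).mpr hl
      have hstep : pvStepLine (c, []) l = (c + 1, ['b', 'o', 'd', 'y']) := by
        simp [pvStepLine, hin]
      rw [List.foldl_cons, hstep, foldl_stepLine_body]
      simp only [pvScan, if_pos hl]
      simp at h
      omega
    · have hin : l.toList.foldl pvStepChar [] ≠ ['b', 'o', 'd', 'y'] := by
        intro he; exact hl ((inner_body_iff l).mp he)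
      have hstep : pvStepLine (c, []) l = (c, []) := by
        simp [pvStepLine, hin]
      rw [List.foldl_cons, hstep, ih c (i + 1) (by simp at h ⊢; omega)]
      simp [pvScan, hl]

-- ===== VERDICT (by name: the statement is the Claim_ definition above) =====
theorem nombreLigneBody_spec : Claim_equal_nombreLigneBody := by
  intro fichier _
  unfold Spec_nombreLigneBody nombreLigneBody nombreLigneBody_alt
  rw [main_lemma fichier 0 fichier.length 0 (by simp)]
  ring
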